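-- pv_equiv track=rewrite | github.com/Chocochip101/Algorithm | 프로그래머스/lv2/92342. 양궁대회/양궁대회.py | solution
-- ===== SOURCE A (Python) =====
-- from itertools import combinations_with_replacement
-- from collections import Counter
--
-- def solution(n, info):
--     info = info[::-1]
--     answer = []
--     max_n = -1
--     k = len(info)
--     for c in combinations_with_replacement(range(0, k), n):
--         ryan = 0
--         apeach = 0
--         tmp_ans = [0 for _ in range(k)]
--
--         c = Counter(c)
--         for i in range(0, k):
--             if info[i] < c[i]:
--                 ryan += i
--             elif info[i] != 0:
--                 apeach += i
--
--             tmp_ans[i] = c[i]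
--         if ryan > apeach:
--             diff = ryan - apeach
--             if max_n < diff:
--                 max_n = diff
--                 answer = tmp_ans
--     if answer:
--         return answer[::-1]
--     else:
--         return [-1]
-- ===== SOURCE B (Python) =====
-- def solution(n, info):
--     # Recursive branch-and-accumulate: distribute the n arrows over the targets
--     # (low score first, counts descending at each target), scoring the diff
--     # incrementally instead of materializing index-tuples and recounting them.
--     rev = info[::-1]
--     k = len(rev)
--
--     def go(i, rem, d, acc, best):
--         if i == k:
--             if rem == 0 and d > 0 and d > best[0]:
--                 return (d, acc)
--             return best
--         for v in range(rem, -1, -1):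
--             if rev[i] < v:
--                 nd = d + i
--             elif rev[i] != 0:
--                 nd = d - i
--             else:
--                 nd = d
--             best = go(i + 1, rem - v, nd, acc + [v], best)
--         return best
--
--     _, cnts = go(0, n, 0, [], (-1, None))
--     return cnts[::-1] if cnts is not None else [-1]
-- ===== Notes on version B (the rewrite author's own statement) =====
-- stated objective: alternative
-- what changed: A materializes every sorted index-tuple via itertools.combinations_with_replacement, builds a Counter and rescans all k targets per candidate; B recurses directly over the targets, distributing the remaining arrows (descending per target) while carrying the count vector and the score difference incrementally, so no tuples, no Counter and no per-candidate rescan exist.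
import Mathlib
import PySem

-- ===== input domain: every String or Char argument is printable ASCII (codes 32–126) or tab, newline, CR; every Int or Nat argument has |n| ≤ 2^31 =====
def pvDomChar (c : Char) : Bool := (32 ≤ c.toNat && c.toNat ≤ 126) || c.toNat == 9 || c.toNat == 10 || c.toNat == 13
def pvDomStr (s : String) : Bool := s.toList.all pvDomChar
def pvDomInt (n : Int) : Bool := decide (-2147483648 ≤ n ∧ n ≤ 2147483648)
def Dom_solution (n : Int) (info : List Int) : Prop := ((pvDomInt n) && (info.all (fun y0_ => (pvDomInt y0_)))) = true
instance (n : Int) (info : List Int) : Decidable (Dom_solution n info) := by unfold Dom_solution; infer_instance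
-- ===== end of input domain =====

-- B replaces A's itertools tuple enumeration + per-candidate Counter rescan by a direct
-- recursion over the targets that carries the count vector and the score difference
-- incrementally (same candidate space, no re-counting pass per candidate).

-- ===== PORT A =====
-- itertools.combinations_with_replacement(pool, r): all sorted r-tuples from pool, lexicographic
def cwr : List Int → Nat → List (List Int)
  | _, 0 => [[]]
  | [], _ + 1 => []
  | x :: xs, r + 1 => ((cwr (x :: xs) r).map (fun c => x :: c)) ++ cwr xs (r + 1)
termination_by pool r => (pool.length, r)

def solution (n : Int) (info : List Int) : List Int :=
  -- info = info[::-1]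
  let rev := (PySem.List.slice? info none none (-1)).getD []
  let k := rev.length
  -- for c in combinations_with_replacement(range(0, k), n):  (n < 0 raises in Python: outside Pre_)
  let st := (cwr (PySem.List.pyRange 0 (k : Int) 1) n.toNat).foldl
    (fun (st : Int × List Int) c =>
      let cnt := PySem.Dict.counter c          -- c = Counter(c)
      let inner := (PySem.List.pyRange 0 (k : Int) 1).foldl
        (fun (acc : Int × Int × List Int) i =>
          let acc' := if PySem.List.pyGetD rev i 0 < cnt.getD i 0 then (acc.1 + i, acc.2.1, acc.2.2)
            else if PySem.List.pyGetD rev i 0 ≠ 0 then (acc.1, acc.2.1 + i, acc.2.2)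
            else acc
          (acc'.1, acc'.2.1, acc'.2.2.set i.toNat (cnt.getD i 0)))
        (0, 0, List.replicate k 0)
      if inner.2.1 < inner.1 then
        (if st.1 < inner.1 - inner.2.1 then (inner.1 - inner.2.1, inner.2.2) else st)
      else st)
    ((-1 : Int), ([] : List Int))
  if st.2 ≠ [] then (PySem.List.slice? st.2 none none (-1)).getD [] else [-1]

-- ===== PORT B =====
-- go(i, rem, d, acc, best): recursion over the remaining targets (suffix of rev, index i)
def goB : List Int → Int → Int → Int → List Int → Int × Option (List Int) → Int × Option (List Int)
  | [], _, rem, d, acc, best =>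
      if rem = 0 ∧ 0 < d ∧ best.1 < d then (d, some acc) else best
  | x :: rest, i, rem, d, acc, best =>
      (PySem.List.pyRange rem (-1) (-1)).foldl
        (fun best v =>
          let nd := if x < v then d + i else if x ≠ 0 then d - i else d
          goB rest (i + 1) (rem - v) nd (acc ++ [v]) best)
        best

def solution_alt (n : Int) (info : List Int) : List Int :=
  match (goB info.reverse 0 n 0 [] (-1, none)).2 with
  | some c => c.reverse
  | none => [-1]

-- ===== PRECONDITION & SPEC =====
-- Python's combinations_with_replacement raises ValueError for a negative r, so A raises on n < 0.
def Pre_solution (n : Int) (info : List Int) : Prop := 0 ≤ n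
instance (n : Int) (info : List Int) : Decidable (Pre_solution n info) := by unfold Pre_solution; infer_instance
def pvWitness_solution : Int × List Int := (1, [0, 0])

def Spec_solution (n : Int) (info : List Int) (out : List Int) : Prop := out = solution_alt n info
instance (n : Int) (info : List Int) (out : List Int) : Decidable (Spec_solution n info out) := by unfold Spec_solution; infer_instance

-- ===== CLAIM (what is proved, stated in full; the proofs are below) =====
def Claim_equal_solution : Prop := ∀ (n : Int) (info : List Int), Dom_solution n info → Pre_solution n info → Spec_solution n info (solution n info)

-- ===== LEMMAS AND PROOFS =====

-- proof-side: compositions of rem into j parts, first coordinate descending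
def comps : Nat → Int → List (List Int)
  | 0, rem => if rem = 0 then [[]] else []
  | j + 1, rem => (PySem.List.pyRange rem (-1) (-1)).flatMap (fun v => (comps j (rem - v)).map (fun t => v :: t))

def compsN : Nat → Nat → List (List Int)
  | 0, m => if m = 0 then [[]] else []
  | j + 1, m => (List.range (m + 1)).flatMap (fun t => (compsN j t).map (fun l => (((m - t : Nat) : Int)) :: l))

-- score difference (ryan - apeach) of count vector vec against target suffix rev, starting index i
def scoreFrom : List Int → Int → List Int → Int
  | x :: xs, i, v :: vs => (if x < v then i else if x ≠ 0 then -i else 0) + scoreFrom xs (i + 1) vs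
  | _, _, _ => 0

-- ryan / apeach totals of A's inner loop, as functions of the count function f
def RY : List Int → Int → (Int → Int) → Int
  | [], _, _ => 0
  | x :: t, s, f => (if x < f s then s else 0) + RY t (s + 1) f

def AP : List Int → Int → (Int → Int) → Int
  | [], _, _ => 0
  | x :: t, s, f => (if x < f s then 0 else if x ≠ 0 then s else 0) + AP t (s + 1) f


theorem flatMap_congr_mem {α β : Type} {l : List α} {f g : α → List β}
    (h : ∀ x ∈ l, f x = g x) : l.flatMap f = l.flatMap g := by
  induction l with
  | nil => rfl
  | cons x t ih =>
    simp only [List.flatMap_cons]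
    rw [h x (by simp), ih (fun y hy => h y (by simp [hy]))]

theorem scoreFrom_nil (i : Int) (v : List Int) : scoreFrom [] i v = 0 := by
  cases v <;> rfl

theorem scoreFrom_nil' (xs : List Int) (i : Int) : scoreFrom xs i [] = 0 := by
  cases xs <;> rfl

theorem comps_natCast (j : Nat) : ∀ (m : Nat), comps j ((m : Nat) : Int) = compsN j m := by
  induction j with
  | zero =>
    intro m
    simp [comps, compsN, Int.natCast_eq_zero]
  | succ j ih =>
    intro m
    simp only [comps, compsN]
    rw [PySem.List.pyRange_neg_one]
    have h1 : (((m : Nat) : Int) - (-1)).toNat = m + 1 := by omega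
    rw [h1, List.flatMap_map]
    apply flatMap_congr_mem
    intro k hk
    have hk' : k ≤ m := by simp only [List.mem_range] at hk; omega
    have e1 : ((m : Nat) : Int) - (((m : Nat) : Int) - ((k : Nat) : Int)) = ((k : Nat) : Int) := by ring
    have e2 : ((m : Nat) : Int) - ((k : Nat) : Int) = (((m - k : Nat) : Nat) : Int) := by omega
    rw [e1, ih k, ← e2]

theorem goB_char : ∀ (rest : List Int) (i rem d : Int) (acc : List Int) (best : Int × Option (List Int)),
    goB rest i rem d acc best =
      (comps rest.length rem).foldl
        (fun b vec =>
          if 0 < d + scoreFrom rest i vec ∧ b.1 < d + scoreFrom rest i vec then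
            (d + scoreFrom rest i vec, some (acc ++ vec))
          else b) best := by
  intro rest
  induction rest with
  | nil =>
    intro i rem d acc best
    simp only [goB, List.length_nil, comps]
    by_cases h : rem = 0
    · subst h
      simp only [if_pos rfl, List.foldl_cons, scoreFrom_nil, add_zero]
      split_ifs <;> simp_all
    · rw [if_neg h, if_neg (by simp [h]), List.foldl_nil]
  | cons x rest ih =>
    intro i rem d acc best
    simp only [goB, List.length_cons, comps, List.foldl_flatMap, ih, List.foldl_map]
    congr 1
    funext b v
    congr 1
    funext b' vec
    have hs : d + scoreFrom (x :: rest) i (v :: vec)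
        = (if x < v then d + i else if x ≠ 0 then d - i else d) + scoreFrom rest (i + 1) vec := by
      show d + ((if x < v then i else if x ≠ 0 then -i else 0) + scoreFrom rest (i + 1) vec) = _
      split_ifs <;> ring
    rw [← hs]
    simp only [List.append_assoc, List.cons_append, List.nil_append]

theorem cwr_cons (x : Int) (xs : List Int) (m : Nat) :
    cwr (x :: xs) m = (List.range (m + 1)).flatMap
      (fun k => (cwr xs k).map (fun t => List.replicate (m - k) x ++ t)) := by
  induction m with
  | zero =>
    simp [cwr, List.range_succ]
  | succ m ihm =>
    have lhs : cwr (x :: xs) (m + 1) = ((cwr (x :: xs) m).map (fun c => x :: c)) ++ cwr xs (m + 1) := by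
      simp [cwr]
    rw [lhs, ihm, List.map_flatMap]
    conv_rhs => rw [show m + 1 + 1 = (m + 1) + 1 from rfl, List.range_succ, List.flatMap_append]
    congr 1
    · apply flatMap_congr_mem
      intro k hk
      have hk' : k ≤ m := by simp only [List.mem_range] at hk; omega
      rw [List.map_map]
      apply List.map_congr_left
      intro t _
      show x :: (List.replicate (m - k) x ++ t) = List.replicate (m + 1 - k) x ++ t
      rw [show m + 1 - k = (m - k) + 1 by omega, List.replicate_succ, List.cons_append]
    · simp [cwr]

theorem cwr_subset : ∀ (pool : List Int) (m : Nat), ∀ c ∈ cwr pool m, ∀ y ∈ c, y ∈ pool := by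
  intro pool m
  induction pool, m using cwr.induct with
  | case1 pool =>
    intro c hc y hy
    simp only [cwr, List.mem_singleton] at hc
    subst hc
    simp at hy
  | case2 m =>
    intro c hc
    simp [cwr] at hc
  | case3 x xs r ih1 ih2 =>
    intro c hc y hy
    simp only [cwr, List.mem_append, List.mem_map] at hc
    rcases hc with ⟨c', hc', rfl⟩ | hc
    · rcases List.mem_cons.mp hy with rfl | hy'
      · exact List.mem_cons_self
      · exact ih1 c' hc' y hy'
    · exact List.mem_cons_of_mem _ (ih2 c hc y hy)

theorem map_cvec_cwr : ∀ (j : Nat) (a : Int) (m : Nat),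
    (cwr (PySem.List.pyRange a (a + (j : Nat)) 1) m).map
        (fun c => (PySem.List.pyRange a (a + (j : Nat)) 1).map (fun y => ((c.count y : Nat) : Int)))
      = compsN j m := by
  intro j
  induction j with
  | zero =>
    intro a m
    rw [show a + ((0 : Nat) : Int) = a by simp, PySem.List.pyRange_one_eq_nil (le_refl a)]
    cases m with
    | zero => simp [cwr, compsN]
    | succ m => simp [cwr, compsN]
  | succ j ih =>
    intro a m
    have he : a + ((j + 1 : Nat) : Int) = (a + 1) + ((j : Nat) : Int) := by push_cast; ring
    have hpool : PySem.List.pyRange a (a + ((j + 1 : Nat) : Int)) 1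
        = a :: PySem.List.pyRange (a + 1) ((a + 1) + (j : Nat)) 1 := by
      rw [he, PySem.List.pyRange_one_cons (by omega)]
    rw [hpool, cwr_cons, List.map_flatMap]
    simp only [compsN]
    apply flatMap_congr_mem
    intro k hk
    rw [List.map_map]
    have hcongr : ∀ t ∈ cwr (PySem.List.pyRange (a + 1) ((a + 1) + (j : Nat)) 1) k,
        ((fun c => (a :: PySem.List.pyRange (a + 1) ((a + 1) + (j : Nat)) 1).map
            (fun y => ((c.count y : Nat) : Int))) ∘
          (fun t => List.replicate (m - k) a ++ t)) t
        = (((m - k : Nat) : Nat) : Int) ::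
            (PySem.List.pyRange (a + 1) ((a + 1) + (j : Nat)) 1).map (fun y => ((t.count y : Nat) : Int)) := by
      intro t ht
      have hanotin : a ∉ t := by
        intro hat
        have := cwr_subset _ k t ht a hat
        rw [PySem.List.mem_pyRange_one] at this
        omega
      simp only [Function.comp_apply, List.map_cons]
      congr 1
      · rw [List.count_append, List.count_replicate]
        simp [List.count_eq_zero.mpr hanotin]
      · apply List.map_congr_left
        intro y hy
        rw [PySem.List.mem_pyRange_one] at hy
        rw [List.count_append, List.count_replicate]
        have : ¬ (a == y) = true := by simp; omega
        simp [this]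
    rw [List.map_congr_left hcongr]
    rw [show (fun t : List Int => (((m - k : Nat) : Nat) : Int) ::
          (PySem.List.pyRange (a + 1) ((a + 1) + (j : Nat)) 1).map (fun y => ((t.count y : Nat) : Int)))
        = (fun l : List Int => (((m - k : Nat) : Nat) : Int) :: l) ∘
          (fun t : List Int => (PySem.List.pyRange (a + 1) ((a + 1) + (j : Nat)) 1).map
            (fun y => ((t.count y : Nat) : Int))) from rfl]
    rw [← List.map_map, ih (a + 1) k]

theorem score_link : ∀ (xs : List Int) (s : Int) (f : Int → Int),
    scoreFrom xs s ((PySem.List.pyRange s (s + (xs.length : Nat)) 1).map f) = RY xs s f - AP xs s f := by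
  intro xs
  induction xs with
  | nil =>
    intro s f
    rw [show s + (((List.nil : List Int).length : Nat) : Int) = s by simp,
      PySem.List.pyRange_one_eq_nil (le_refl s)]
    simp [scoreFrom_nil', RY, AP]
  | cons x t ih =>
    intro s f
    have he : s + (((x :: t).length : Nat) : Int) = (s + 1) + ((t.length : Nat) : Int) := by
      simp only [List.length_cons]; push_cast; ring
    have h1 : PySem.List.pyRange s (s + (((x :: t).length : Nat) : Int)) 1
        = s :: PySem.List.pyRange (s + 1) ((s + 1) + ((t.length : Nat) : Int)) 1 := by
      rw [he, PySem.List.pyRange_one_cons (by omega)]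
    rw [h1]
    simp only [List.map_cons]
    show (if x < f s then s else if x ≠ 0 then -s else 0) + scoreFrom t (s + 1) _ = _
    rw [ih (s + 1) f]
    simp only [RY, AP]
    split_ifs <;> ring

theorem innerA : ∀ (xs : List Int) (f : Int → Int) (s : Nat) (r p : Int) (tmp : List Int),
    tmp.length = s + xs.length →
    (PySem.List.enumerate xs ((s : Nat) : Int)).foldl
      (fun (acc : Int × Int × List Int) pr =>
        if pr.2 < f pr.1 then (acc.1 + pr.1, acc.2.1, acc.2.2.set pr.1.toNat (f pr.1))
        else if pr.2 ≠ 0 then (acc.1, acc.2.1 + pr.1, acc.2.2.set pr.1.toNat (f pr.1))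
        else (acc.1, acc.2.1, acc.2.2.set pr.1.toNat (f pr.1))) (r, p, tmp)
    = (r + RY xs ((s : Nat) : Int) f, p + AP xs ((s : Nat) : Int) f,
       tmp.take s ++ (PySem.List.pyRange ((s : Nat) : Int) (((s : Nat) : Int) + (xs.length : Nat)) 1).map f) := by
  intro xs
  induction xs with
  | nil =>
    intro f s r p tmp hlen
    simp only [List.length_nil, Nat.add_zero] at hlen
    rw [PySem.List.enumerate_nil]
    simp only [List.foldl_nil, RY, AP, List.length_nil]
    rw [show ((s : Nat) : Int) + ((0 : Nat) : Int) = ((s : Nat) : Int) by simp,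
      PySem.List.pyRange_one_eq_nil (le_refl _)]
    simp [List.take_of_length_le (le_of_eq hlen), add_zero]
  | cons x t ih =>
    intro f s r p tmp hlen
    simp only [List.length_cons] at hlen
    have hslen : s < tmp.length := by omega
    rw [PySem.List.enumerate_cons]
    simp only [List.foldl_cons]
    have hcast : ((s : Nat) : Int) + 1 = (((s + 1 : Nat) : Nat) : Int) := by push_cast; ring
    have hsetlen : ∀ v : Int, (tmp.set ((s : Nat) : Int).toNat v).length = (s + 1) + t.length := by
      intro v
      simp only [List.length_set]
      omega
    have htake : ∀ v : Int, (tmp.set ((s : Nat) : Int).toNat v).take (s + 1) = tmp.take s ++ [v] := by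
      intro v
      rw [Int.toNat_natCast, List.take_add_one, List.take_set]
      have h1 : (tmp.take s).length ≤ s := by simp
      rw [List.set_eq_of_length_le h1, List.getElem?_set_self hslen]
      rfl
    have hrange : (PySem.List.pyRange ((s : Nat) : Int) (((s : Nat) : Int) + (((x :: t).length : Nat) : Int)) 1).map f
        = f ((s : Nat) : Int) :: (PySem.List.pyRange (((s + 1 : Nat) : Nat) : Int)
            ((((s + 1 : Nat) : Nat) : Int) + ((t.length : Nat) : Int)) 1).map f := by
      have he : ((s : Nat) : Int) + (((x :: t).length : Nat) : Int)
          = (((s + 1 : Nat) : Nat) : Int) + ((t.length : Nat) : Int) := by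
        simp only [List.length_cons]; push_cast; ring
      rw [he, PySem.List.pyRange_one_cons (by push_cast; omega), List.map_cons, hcast]
    have hRY : RY (x :: t) ((s : Nat) : Int) f
        = (if x < f ((s : Nat) : Int) then ((s : Nat) : Int) else 0)
            + RY t (((s + 1 : Nat) : Nat) : Int) f := by
      rw [← hcast]; simp only [RY]
    have hAP : AP (x :: t) ((s : Nat) : Int) f
        = (if x < f ((s : Nat) : Int) then 0 else if x ≠ 0 then ((s : Nat) : Int) else 0)
            + AP t (((s + 1 : Nat) : Nat) : Int) f := by
      rw [← hcast]; simp only [AP]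
    rw [hRY, hAP, hrange]
    by_cases h1 : x < f ((s : Nat) : Int)
    · rw [if_pos h1, if_pos h1, if_pos h1, hcast, ih f (s + 1) (r + ((s : Nat) : Int)) p _ (hsetlen _)]
      simp only [Prod.mk.injEq]
      refine ⟨by ring, by ring, ?_⟩
      rw [htake]
      simp
    · rw [if_neg h1, if_neg h1, if_neg h1]
      by_cases h2 : x ≠ 0
      · rw [if_pos h2, if_pos h2, hcast, ih f (s + 1) r (p + ((s : Nat) : Int)) _ (hsetlen _)]
        simp only [Prod.mk.injEq]
        refine ⟨by ring, by ring, ?_⟩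
        rw [htake]
        simp
      · rw [if_neg h2, if_neg h2, hcast, ih f (s + 1) r p _ (hsetlen _)]
        simp only [Prod.mk.injEq]
        refine ⟨by ring, by ring, ?_⟩
        rw [htake]
        simp

theorem relFold (σ : List Int → Int) : ∀ (L : List (List Int)) (sA : Int × List Int) (sB : Int × Option (List Int)),
    (∀ v ∈ L, v = [] → σ v ≤ 0) →
    sA.1 = sB.1 →
    (match sB.2 with | none => sA.2 = [] | some c => sA.2 = c ∧ c ≠ []) →
    (L.foldl (fun st v => if 0 < σ v then (if st.1 < σ v then (σ v, v) else st) else st) sA).1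
      = (L.foldl (fun b v => if 0 < σ v ∧ b.1 < σ v then (σ v, some v) else b) sB).1 ∧
    (match (L.foldl (fun b v => if 0 < σ v ∧ b.1 < σ v then (σ v, some v) else b) sB).2 with
      | none => (L.foldl (fun st v => if 0 < σ v then (if st.1 < σ v then (σ v, v) else st) else st) sA).2 = []
      | some c => (L.foldl (fun st v => if 0 < σ v then (if st.1 < σ v then (σ v, v) else st) else st) sA).2 = c ∧ c ≠ []) := by
  intro L
  induction L with
  | nil =>
    intro sA sB _ h1 h2
    exact ⟨h1, h2⟩
  | cons v L ih =>
    intro sA sB hmem h1 h2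
    simp only [List.foldl_cons]
    apply ih _ _ (fun w hw => hmem w (List.mem_cons_of_mem _ hw))
    · by_cases hp : 0 < σ v
      · by_cases hlt : sA.1 < σ v
        · rw [if_pos hp, if_pos hlt, if_pos ⟨hp, by omega⟩]
        · rw [if_pos hp, if_neg hlt, if_neg (by omega)]
          exact h1
      · rw [if_neg hp, if_neg (by tauto)]
        exact h1
    · by_cases hp : 0 < σ v
      · by_cases hlt : sA.1 < σ v
        · rw [if_pos hp, if_pos hlt, if_pos ⟨hp, by omega⟩]
          refine ⟨rfl, ?_⟩
          intro hnil
          exact absurd (hmem v (by simp) hnil) (by omega)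
        · rw [if_pos hp, if_neg hlt, if_neg (by omega)]
          exact h2
      · rw [if_neg hp, if_neg (by tauto)]
        exact h2

theorem relFold2 (F : List Int → List Int) (σ : List Int → Int) (ry ap : List Int → Int)
    (hσ : ∀ c, σ (F c) = ry c - ap c) :
    ∀ (L : List (List Int)) (sA : Int × List Int) (sB : Int × Option (List Int)),
    (∀ c ∈ L, F c = [] → σ (F c) ≤ 0) →
    sA.1 = sB.1 →
    (match sB.2 with | none => sA.2 = [] | some c => sA.2 = c ∧ c ≠ []) →
    (L.foldl (fun st c => if ap c < ry c then (if st.1 < ry c - ap c then (ry c - ap c, F c) else st) else st) sA).1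
      = ((L.map F).foldl (fun b v => if 0 < σ v ∧ b.1 < σ v then (σ v, some v) else b) sB).1 ∧
    (match ((L.map F).foldl (fun b v => if 0 < σ v ∧ b.1 < σ v then (σ v, some v) else b) sB).2 with
      | none => (L.foldl (fun st c => if ap c < ry c then (if st.1 < ry c - ap c then (ry c - ap c, F c) else st) else st) sA).2 = []
      | some c => (L.foldl (fun st c => if ap c < ry c then (if st.1 < ry c - ap c then (ry c - ap c, F c) else st) else st) sA).2 = c ∧ c ≠ []) := by
  intro L sA sB hmem h1 h2
  have hb : (fun (st : Int × List Int) c =>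
        if ap c < ry c then (if st.1 < ry c - ap c then (ry c - ap c, F c) else st) else st)
      = fun st c => (fun (st : Int × List Int) v =>
          if 0 < σ v then (if st.1 < σ v then (σ v, v) else st) else st) st (F c) := by
    funext st c
    simp only [hσ c, sub_pos]
  rw [hb, ← List.foldl_map (f := F)
    (g := fun (st : Int × List Int) (v : List Int) =>
      if 0 < σ v then (if st.1 < σ v then (σ v, v) else st) else st)]
  exact relFold σ (L.map F) sA sB
    (by intro v hv; obtain ⟨c, hc, rfl⟩ := List.mem_map.mp hv; exact hmem c hc) h1 h2

theorem final_step (RA : Int × List Int) (RB : Int × Option (List Int))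
    (h2 : match RB.2 with | none => RA.2 = [] | some c => RA.2 = c ∧ c ≠ []) :
    (if RA.2 ≠ [] then RA.2.reverse else [-1]) = (match RB.2 with | some c => c.reverse | none => [-1]) := by
  rcases RB with ⟨b, ob⟩
  cases ob with
  | none =>
    have h2' : RA.2 = [] := h2
    show _ = ([-1] : List Int)
    rw [h2']
    simp
  | some c =>
    have h2' : RA.2 = c ∧ c ≠ [] := h2
    show _ = c.reverse
    rw [h2'.1, if_pos h2'.2]

theorem Abody_eq (rev : List Int) (c : List Int) :
    (PySem.List.pyRange 0 ((rev.length : Nat) : Int) 1).foldl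
      (fun (acc : Int × Int × List Int) i =>
        let acc' := if PySem.List.pyGetD rev i 0 < (PySem.Dict.counter c).getD i 0 then (acc.1 + i, acc.2.1, acc.2.2)
          else if PySem.List.pyGetD rev i 0 ≠ 0 then (acc.1, acc.2.1 + i, acc.2.2)
          else acc
        (acc'.1, acc'.2.1, acc'.2.2.set i.toNat ((PySem.Dict.counter c).getD i 0)))
      (0, 0, List.replicate rev.length 0)
    = (RY rev 0 (fun y => ((c.count y : Nat) : Int)), AP rev 0 (fun y => ((c.count y : Nat) : Int)),
       (PySem.List.pyRange 0 ((rev.length : Nat) : Int) 1).map (fun y => ((c.count y : Nat) : Int))) := by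
  have hbody : (fun (acc : Int × Int × List Int) (i : Int) =>
        let acc' := if PySem.List.pyGetD rev i 0 < (PySem.Dict.counter c).getD i 0 then (acc.1 + i, acc.2.1, acc.2.2)
          else if PySem.List.pyGetD rev i 0 ≠ 0 then (acc.1, acc.2.1 + i, acc.2.2)
          else acc
        (acc'.1, acc'.2.1, acc'.2.2.set i.toNat ((PySem.Dict.counter c).getD i 0)))
      = (fun (acc : Int × Int × List Int) (i : Int) =>
        (fun (acc : Int × Int × List Int) (pr : Int × Int) =>
          if pr.2 < (fun y => ((c.count y : Nat) : Int)) pr.1 then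
            (acc.1 + pr.1, acc.2.1, acc.2.2.set pr.1.toNat ((fun y => ((c.count y : Nat) : Int)) pr.1))
          else if pr.2 ≠ 0 then (acc.1, acc.2.1 + pr.1, acc.2.2.set pr.1.toNat ((fun y => ((c.count y : Nat) : Int)) pr.1))
          else (acc.1, acc.2.1, acc.2.2.set pr.1.toNat ((fun y => ((c.count y : Nat) : Int)) pr.1)))
        acc (i, PySem.List.pyGetD rev i 0)) := by
    funext acc i
    simp only [PySem.Dict.getD_counter]
    split_ifs <;> rfl
  rw [hbody]
  have h := innerA rev (fun y => ((c.count y : Nat) : Int)) 0 0 0 (List.replicate rev.length 0) (by simp)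
  simp only [Nat.cast_zero, zero_add, List.take_zero, List.nil_append] at h
  rw [PySem.List.enumerate_eq_map_pyRange (d := (0 : Int)), List.foldl_map] at h
  exact h

-- ===== VERDICT (by name: the statement is the Claim_ definition above) =====
theorem solution_spec : Claim_equal_solution := by
  intro n info _ hpre
  unfold Pre_solution at hpre
  unfold Spec_solution solution solution_alt
  obtain ⟨m, rfl⟩ : ∃ m : Nat, n = ((m : Nat) : Int) := ⟨n.toNat, (Int.toNat_of_nonneg hpre).symm⟩
  simp only [PySem.List.slice?_none_none_neg_one, Option.getD_some, Int.toNat_natCast, Abody_eq]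
  rw [goB_char, comps_natCast]
  simp only [zero_add, List.nil_append]
  have hσ : ∀ c : List Int,
      scoreFrom info.reverse 0 ((PySem.List.pyRange 0 ((info.reverse.length : Nat) : Int) 1).map
        (fun y => ((c.count y : Nat) : Int)))
      = RY info.reverse 0 (fun y => ((c.count y : Nat) : Int))
        - AP info.reverse 0 (fun y => ((c.count y : Nat) : Int)) := by
    intro c
    have h := score_link info.reverse 0 (fun y => ((c.count y : Nat) : Int))
    rwa [zero_add] at h
  have hmc := map_cvec_cwr info.reverse.length 0 m
  rw [zero_add] at hmc
  have hrel := relFold2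
      (fun c : List Int => (PySem.List.pyRange 0 ((info.reverse.length : Nat) : Int) 1).map
        (fun y => ((c.count y : Nat) : Int)))
      (scoreFrom info.reverse 0) _ _ hσ
      (cwr (PySem.List.pyRange 0 ((info.reverse.length : Nat) : Int) 1) m)
      ((-1 : Int), ([] : List Int)) ((-1 : Int), (none : Option (List Int)))
      (by intro c hc h; rw [h, scoreFrom_nil'])
      rfl rfl
  rw [hmc] at hrel
  exact final_step _ _ hrel.2
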